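-- pv_equiv track=rewrite | github.com/reshinto/algo_flow | src/algorithms/trees/advanced/avl-insert-rotation/sources/avl-insert-rotation.py | avl_insert_rotation
-- ===== SOURCE A (Python) =====
-- class AVLNode:
--     def __init__(self, value: int):
--         self.value = value
--         self.left = None
--         self.right = None
--         self.height = 1
--
-- def avl_insert_rotation(values: list) -> list:
--     root = None  # @step:initialize
--
--     def height(node) -> int:
--         return node.height if node else 0  # @step:check-balance
--
--     def update_height(node) -> None:
--         node.height = 1 + max(height(node.left), height(node.right))  # @step:update-height
--
--     def balance_factor(node) -> int:
--         return height(node.left) - height(node.right)  # @step:check-balance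
--
--     def rotate_right(pivot_node):
--         left_child = pivot_node.left  # @step:rotate-right
--         pivot_node.left = left_child.right
--         left_child.right = pivot_node
--         update_height(pivot_node)
--         update_height(left_child)
--         return left_child  # @step:rotate-right
--
--     def rotate_left(pivot_node):
--         right_child = pivot_node.right  # @step:rotate-left
--         pivot_node.right = right_child.left
--         right_child.left = pivot_node
--         update_height(pivot_node)
--         update_height(right_child)
--         return right_child  # @step:rotate-left
--
--     def insert(node, value):
--         if not node:
--             return AVLNode(value)  # @step:insert-node
--
--         if value < node.value:
--             node.left = insert(node.left, value)  # @step:traverse-left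
--         elif value > node.value:
--             node.right = insert(node.right, value)  # @step:traverse-right
--         else:
--             return node  # @step:visit
--
--         update_height(node)
--         balance = balance_factor(node)  # @step:check-balance
--
--         # LL case
--         if balance > 1 and node.left and value < node.left.value:
--             return rotate_right(node)  # @step:rotate-right
--         # RR case
--         if balance < -1 and node.right and value > node.right.value:
--             return rotate_left(node)  # @step:rotate-left
--         # LR case
--         if balance > 1 and node.left:
--             node.left = rotate_left(node.left)  # @step:rotate-left
--             return rotate_right(node)  # @step:rotate-right
--         # RL case
--         if balance < -1 and node.right:
--             node.right = rotate_right(node.right)  # @step:rotate-right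
--             return rotate_left(node)  # @step:rotate-left
--
--         return node
--
--     for value in values:
--         root = insert(root, value)  # @step:insert-node
--
--     result = []
--     def inorder(node):
--         if not node:
--             return
--         inorder(node.left)
--         result.append(node.value)
--         inorder(node.right)
--     inorder(root)
--     return result  # @step:complete
-- ===== SOURCE B (Python) =====
-- def avl_insert_rotation(values: list) -> list:
--     result = []  # kept sorted and duplicate-free
--     for v in values:
--         i = 0
--         while i < len(result) and result[i] < v:
--             i += 1
--         if i == len(result) or v < result[i]:
--             result.insert(i, v)
--     return result
-- ===== Notes on version B (the rewrite author's own statement) =====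
-- stated objective: simpler
-- what changed: Replaces the AVL tree with rotations and height bookkeeping by a plain sorted duplicate-free list maintained by ordered insertion; the inorder traversal disappears because the list is the answer.
import Mathlib
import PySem

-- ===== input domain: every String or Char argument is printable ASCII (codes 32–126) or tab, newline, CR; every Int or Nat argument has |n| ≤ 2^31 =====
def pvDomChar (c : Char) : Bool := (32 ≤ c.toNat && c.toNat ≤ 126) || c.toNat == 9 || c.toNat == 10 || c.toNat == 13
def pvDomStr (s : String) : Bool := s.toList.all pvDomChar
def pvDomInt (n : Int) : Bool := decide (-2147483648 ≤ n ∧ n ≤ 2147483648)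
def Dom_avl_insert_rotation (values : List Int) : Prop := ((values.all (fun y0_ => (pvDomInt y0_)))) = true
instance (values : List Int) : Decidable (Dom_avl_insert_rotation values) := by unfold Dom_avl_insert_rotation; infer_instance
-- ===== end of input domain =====

-- B replaces the AVL tree (rotations, height bookkeeping, inorder traversal) by a plain
-- sorted duplicate-free list maintained by ordered insertion: simpler, same return value.

-- ===== PORT A =====
-- AVL node: left subtree, value, height, right subtree (height mirrors Python's .height field)
inductive AVL : Type
  | leaf : AVL
  | node : AVL → Int → Int → AVL → AVL
deriving DecidableEq, Repr

def AVL.ht : AVL → Int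
  | .leaf => 0
  | .node _ _ h _ => h

def AVL.isNode : AVL → Bool
  | .leaf => false
  | .node _ _ _ _ => true

-- value of a node; the 0 for leaf is never used (guarded by isNode, as Python guards by `node.left`)
def AVL.valOf : AVL → Int
  | .leaf => 0
  | .node _ x _ _ => x

-- rotate_right; Python crashes if pivot.left is None, but every call site guards that,
-- so the fallback branch is unreachable
def rotR : AVL → AVL
  | .node (.node ll lv _ lr) x _ r =>
      let p := AVL.node lr x (1 + max lr.ht r.ht) r
      AVL.node ll lv (1 + max ll.ht p.ht) p
  | t => t

def rotL : AVL → AVL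
  | .node l x _ (.node rl rv _ rr) =>
      let p := AVL.node l x (1 + max l.ht rl.ht) rl
      AVL.node p rv (1 + max p.ht rr.ht) rr
  | t => t

-- the balance block of Python's insert, applied after update_height
def rebal : AVL → Int → AVL
  | .node l x h r, v =>
      let bal := l.ht - r.ht
      if bal > 1 ∧ l.isNode ∧ v < l.valOf then rotR (.node l x h r)
      else if bal < -1 ∧ r.isNode ∧ v > r.valOf then rotL (.node l x h r)
      else if bal > 1 ∧ l.isNode then rotR (.node (rotL l) x h r)
      else if bal < -1 ∧ r.isNode then rotL (.node l x h (rotR r))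
      else .node l x h r
  | t, _ => t

def insertA : AVL → Int → AVL
  | .leaf, v => .node .leaf v 1 .leaf
  | .node l x h r, v =>
      if v < x then
        let l' := insertA l v
        rebal (.node l' x (1 + max l'.ht r.ht) r) v
      else if v > x then
        let r' := insertA r v
        rebal (.node l x (1 + max l.ht r'.ht) r') v
      else .node l x h r

def inorder : AVL → List Int
  | .leaf => []
  | .node l x _ r => inorder l ++ x :: inorder r

def avl_insert_rotation (values : List Int) : List Int :=
  inorder (values.foldl insertA .leaf)

-- ===== PORT B =====
-- the `while i < len(result) and result[i] < v` scan: number of leading elements < v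
def scanIdx : List Int → Int → Nat
  | [], _ => 0
  | h :: t, v => if h < v then scanIdx t v + 1 else 0

-- one iteration of B's for-loop; getD's default 0 is never used (guarded by the first disjunct)
def insStep (result : List Int) (v : Int) : List Int :=
  let i := scanIdx result v
  if i = result.length ∨ v < result.getD i 0 then result.insertIdx i v else result

def avl_insert_rotation_alt (values : List Int) : List Int :=
  values.foldl insStep []

-- ===== PRECONDITION & SPEC =====
def Spec_avl_insert_rotation (values : List Int) (out : List Int) : Prop := out = avl_insert_rotation_alt values
instance (values : List Int) (out : List Int) : Decidable (Spec_avl_insert_rotation values out) := by unfold Spec_avl_insert_rotation; infer_instance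

-- ===== CLAIM (what is proved, stated in full; the proofs are below) =====
def Claim_equal_avl_insert_rotation : Prop := ∀ (values : List Int), Dom_avl_insert_rotation values → Spec_avl_insert_rotation values (avl_insert_rotation values)

-- ===== LEMMAS AND PROOFS =====

-- proof-side recursive form of B's sorted insertion
def insUnique : List Int → Int → List Int
  | [], v => [v]
  | h :: t, v =>
      if v < h then v :: h :: t
      else if v > h then h :: insUnique t v
      else h :: t

theorem insStep_eq_insUnique (L : List Int) (v : Int) : insStep L v = insUnique L v := by
  induction L with
  | nil => simp [insStep, scanIdx, insUnique]
  | cons h t ih =>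
      by_cases hv : h < v
      · have step : insStep (h :: t) v = h :: insStep t v := by
          simp only [insStep, scanIdx, if_pos hv, List.length_cons, List.getD_cons_succ,
            List.insertIdx_succ_cons, Nat.add_right_cancel_iff]
          split_ifs <;> rfl
        rw [step, ih]
        simp [insUnique, not_lt.mpr (le_of_lt hv), hv]
      · by_cases hvh : v < h
        · simp [insStep, scanIdx, hv, insUnique, hvh]
        · simp [insStep, scanIdx, hv, insUnique, hvh]

theorem inorder_rotR (t : AVL) : inorder (rotR t) = inorder t := by
  cases t with
  | leaf => rfl
  | node l x h r =>
      cases l with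
      | leaf => rfl
      | node ll lv lh lr => simp [rotR, inorder]

theorem inorder_rotL (t : AVL) : inorder (rotL t) = inorder t := by
  cases t with
  | leaf => rfl
  | node l x h r =>
      cases r with
      | leaf => rfl
      | node rl rv rh rr => simp [rotL, inorder]

theorem inorder_rebal (l : AVL) (x h : Int) (r : AVL) (v : Int) :
    inorder (rebal (.node l x h r) v) = inorder l ++ x :: inorder r := by
  simp only [rebal]
  split_ifs with h1 h2 h3 h4
  · rw [inorder_rotR]; rfl
  · rw [inorder_rotL]; rfl
  · rw [inorder_rotR]; simp only [inorder, inorder_rotL]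
  · rw [inorder_rotL]; simp only [inorder, inorder_rotR]
  · rfl

theorem insU_lt (L : List Int) (R : List Int) (x v : Int) (hvx : v < x) :
    insUnique (L ++ x :: R) v = insUnique L v ++ x :: R := by
  induction L with
  | nil => simp [insUnique, hvx]
  | cons a L ih =>
      by_cases h1 : v < a
      · simp [insUnique, h1]
      · by_cases h2 : v > a
        · simp [insUnique, h1, h2, ih]
        · simp [insUnique, h1, h2]

theorem insU_gt (L : List Int) (R : List Int) (x v : Int) (hxv : x < v)
    (hL : ∀ a ∈ L, a < v) :
    insUnique (L ++ x :: R) v = L ++ x :: insUnique R v := by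
  induction L with
  | nil => simp [insUnique, hxv, not_lt.mpr (le_of_lt hxv)]
  | cons a L ih =>
      have ha : a < v := hL a (by simp)
      simp [insUnique, not_lt.mpr (le_of_lt ha), ha,
        ih (fun b hb => hL b (by simp [hb]))]

theorem insU_self (L : List Int) (R : List Int) (x : Int)
    (hL : ∀ a ∈ L, a < x) :
    insUnique (L ++ x :: R) x = L ++ x :: R := by
  induction L with
  | nil => simp [insUnique]
  | cons a L ih =>
      have ha : a < x := hL a (by simp)
      simp [insUnique, not_lt.mpr (le_of_lt ha), ha,
        ih (fun b hb => hL b (by simp [hb]))]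

theorem mem_insU {a v : Int} {L : List Int} (h : a ∈ insUnique L v) :
    a ∈ L ∨ a = v := by
  induction L with
  | nil => simp [insUnique] at h; simp [h]
  | cons b L ih =>
      by_cases h1 : v < b
      · simp [insUnique, h1] at h
        rcases h with h | h | h <;> simp [h]
      · by_cases h2 : v > b
        · simp [insUnique, h1, h2] at h
          rcases h with h | h
          · simp [h]
          · rcases ih h with h | h <;> simp [h]
        · simp [insUnique, h1, h2] at h
          rcases h with h | h <;> simp [h]

theorem sorted_insU (L : List Int) (v : Int) (hs : L.Pairwise (· < ·)) :
    (insUnique L v).Pairwise (· < ·) := by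
  induction L with
  | nil => simp [insUnique]
  | cons b L ih =>
      rcases List.pairwise_cons.mp hs with ⟨hb, hL⟩
      by_cases h1 : v < b
      · simp only [insUnique, if_pos h1]
        exact List.pairwise_cons.mpr ⟨by
          intro a ha
          rcases List.mem_cons.mp ha with h | h
          · exact h ▸ h1
          · exact lt_trans h1 (hb a h), hs⟩
      · by_cases h2 : v > b
        · simp only [insUnique, if_neg h1, if_pos h2]
          exact List.pairwise_cons.mpr ⟨by
            intro a ha
            rcases mem_insU ha with h | h
            · exact hb a h
            · exact h ▸ h2, ih hL⟩
        · simp only [insUnique, if_neg h1, if_neg h2]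
          exact hs

theorem inorder_insertA (t : AVL) (v : Int) (hs : (inorder t).Pairwise (· < ·)) :
    inorder (insertA t v) = insUnique (inorder t) v := by
  induction t with
  | leaf => rfl
  | node l x h r ihl ihr =>
      simp only [inorder] at hs
      rcases List.pairwise_append.mp hs with ⟨hsl, hsxr, hcross⟩
      rcases List.pairwise_cons.mp hsxr with ⟨hxr, hsr⟩
      rcases lt_trichotomy v x with hvx | hvx | hvx
      · simp only [insertA, if_pos hvx, inorder]
        rw [inorder_rebal, ihl hsl, insU_lt _ _ _ _ hvx]
      · have h1 : ¬ v < x := by omega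
        have h2 : ¬ v > x := by omega
        simp only [insertA, if_neg h1, if_neg h2, inorder]
        subst hvx
        rw [insU_self]
        intro a ha
        exact hcross a ha v (by simp)
      · have h1 : ¬ v < x := by omega
        simp only [insertA, if_neg h1, if_pos hvx, inorder]
        rw [inorder_rebal, ihr hsr, insU_gt _ _ _ _ hvx]
        intro a ha
        exact lt_trans (hcross a ha x (by simp)) hvx

theorem fold_eq (vs : List Int) :
    ∀ t : AVL, (inorder t).Pairwise (· < ·) →
      inorder (vs.foldl insertA t) = vs.foldl insUnique (inorder t) := by
  induction vs with
  | nil => intro t _; rfl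
  | cons v vs ih =>
      intro t hs
      simp only [List.foldl_cons]
      rw [ih (insertA t v) (by rw [inorder_insertA t v hs]; exact sorted_insU _ _ hs),
        inorder_insertA t v hs]

-- ===== VERDICT (by name: the statement is the Claim_ definition above) =====
theorem avl_insert_rotation_spec : Claim_equal_avl_insert_rotation := by
  intro values _
  show avl_insert_rotation values = avl_insert_rotation_alt values
  unfold avl_insert_rotation avl_insert_rotation_alt
  have hF : insStep = insUnique := funext fun L => funext fun v => insStep_eq_insUnique L v
  rw [hF]
  exact fold_eq values .leaf (by simp [inorder])
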